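-- pv_equiv track=rewrite | github.com/xefiji/adventofcode | 2021/day14/main.py | generate
-- ===== SOURCE A (Python) =====
-- def generate(template, generated, rules, start = 0):
--     if start >= len(template)-1:
--         return generated
--
--     part = template[start:start+2]
--     if len(generated) == 0:
--         generated.append(part[0])
--
--     generated.extend([rules[''.join(part)], part[1]])
--     return generate(template, generated, rules, start+1)
-- ===== SOURCE B (Python) =====
-- def generate(template, generated, rules, start=0):
--     n = len(template)
--     if start < n - 1 and not generated:
--         generated.append(template[start])
--     for i in range(start, n - 1):
--         generated.extend([rules[template[i] + template[i + 1]], template[i + 1]])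
--     return generated
-- ===== Notes on version B (the rewrite author's own statement) =====
-- stated objective: simpler
-- what changed: Replaces the tail recursion (which re-slices the template and re-checks the empty-generated guard on every call) with a single hoisted first-character guard followed by one iterative for-loop over pair indices, concatenating adjacent elements directly instead of joining a slice.
import Mathlib
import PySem

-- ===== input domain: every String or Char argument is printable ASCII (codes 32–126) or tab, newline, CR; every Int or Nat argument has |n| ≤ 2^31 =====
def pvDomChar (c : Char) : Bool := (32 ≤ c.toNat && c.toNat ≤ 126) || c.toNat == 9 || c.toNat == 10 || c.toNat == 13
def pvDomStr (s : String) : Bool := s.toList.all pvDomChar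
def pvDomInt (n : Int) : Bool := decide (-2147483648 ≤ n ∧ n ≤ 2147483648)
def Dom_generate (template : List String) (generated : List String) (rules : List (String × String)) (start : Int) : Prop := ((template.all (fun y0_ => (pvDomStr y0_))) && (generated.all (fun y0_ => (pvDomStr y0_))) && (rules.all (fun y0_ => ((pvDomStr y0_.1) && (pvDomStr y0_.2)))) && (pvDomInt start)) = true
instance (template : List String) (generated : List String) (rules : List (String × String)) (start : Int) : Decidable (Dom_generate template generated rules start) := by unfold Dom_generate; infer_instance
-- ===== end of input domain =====

-- B replaces A's tail recursion by one hoisted first-character guard plus a single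
-- iterative loop over pair indices (objective: simpler). A and B both mutate the
-- `generated` list argument in place in Python; the equivalence proved here is about
-- the return value (which is that same list).

-- ===== PORT A =====
-- literal port of A's tail recursion; dict lookup / indexing are total here via .getD "",
-- Pre_generate excludes exactly the inputs where the Python raises (KeyError/IndexError)
def generate (template : List String) (generated : List String) (rules : List (String × String)) (start : Int) : List String :=
  if start ≥ (template.length : Int) - 1 then generated
  else
    let part := PySem.List.slice template (some start) (some (start + 2))
    let generated' := if generated.length = 0 then generated ++ [(PySem.List.pyGet? part 0).getD ""] else generated
    let generated'' := generated' ++ [((PySem.Dict.ofList rules).get? (PySem.Str.join "" part)).getD "", (PySem.List.pyGet? part 1).getD ""]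
    generate template generated'' rules (start + 1)
termination_by ((template.length : Int) - 1 - start).toNat
decreasing_by rename_i h; simp only [not_le] at h; omega

-- ===== PORT B =====
-- port of Source B: hoisted guard, then a fold over range(start, n-1)
def generate_alt (template : List String) (generated : List String) (rules : List (String × String)) (start : Int) : List String :=
  let n : Int := template.length
  let generated' := if start < n - 1 ∧ generated = [] then generated ++ [(PySem.List.pyGet? template start).getD ""] else generated
  (PySem.List.pyRange start (n - 1) 1).foldl
    (fun out i =>
      out ++ [((PySem.Dict.ofList rules).get? ((PySem.List.pyGet? template i).getD "" ++ (PySem.List.pyGet? template (i + 1)).getD "")).getD "",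
              (PySem.List.pyGet? template (i + 1)).getD ""])
    generated'

-- ===== PRECONDITION & SPEC =====
-- Pre_ excludes exactly the inputs where Python A raises: a negative start that still
-- enters the loop (IndexError on the slice indexing, before or after a possible KeyError)
-- and a missing pair-rule key (KeyError). A returns normally on every other input.
def Pre_generate (template : List String) (generated : List String) (rules : List (String × String)) (start : Int) : Prop :=
  ((template.length : Int) - 1 ≤ start) ∨
  (0 ≤ start ∧ ∀ i ∈ List.range template.length,
    (start ≤ (i : Int) ∧ (i : Int) < (template.length : Int) - 1 →
      ((PySem.Dict.ofList rules).contains (template.getD i "" ++ template.getD (i + 1) "")) = true))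
instance (template : List String) (generated : List String) (rules : List (String × String)) (start : Int) : Decidable (Pre_generate template generated rules start) := by unfold Pre_generate; infer_instance

def pvWitness_generate : List String × List String × (List (String × String)) × Int :=
  (["N", "C", "B"], [], [("NC", "B"), ("CB", "H")], 0)

def Spec_generate (template : List String) (generated : List String) (rules : List (String × String)) (start : Int) (out : List String) : Prop := out = generate_alt template generated rules start
instance (template : List String) (generated : List String) (rules : List (String × String)) (start : Int) (out : List String) : Decidable (Spec_generate template generated rules start out) := by unfold Spec_generate; infer_instance

-- ===== CLAIM (what is proved, stated in full; the proofs are below) =====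
def Claim_equal_generate : Prop := ∀ (template : List String) (generated : List String) (rules : List (String × String)) (start : Int), Dom_generate template generated rules start → Pre_generate template generated rules start → Spec_generate template generated rules start (generate template generated rules start)

-- ===== LEMMAS AND PROOFS =====

-- the loop body of B
def genStep (template : List String) (rules : List (String × String)) (out : List String) (i : Int) : List String :=
  out ++ [((PySem.Dict.ofList rules).get? ((PySem.List.pyGet? template i).getD "" ++ (PySem.List.pyGet? template (i + 1)).getD "")).getD "",
          (PySem.List.pyGet? template (i + 1)).getD ""]

lemma generate_alt_eq_foldl (template generated : List String) (rules : List (String × String)) (start : Int) :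
    generate_alt template generated rules start =
      (PySem.List.pyRange start ((template.length : Int) - 1) 1).foldl (genStep template rules)
        (if start < (template.length : Int) - 1 ∧ generated = [] then generated ++ [(PySem.List.pyGet? template start).getD ""] else generated) := by
  rfl

lemma drop_two_cons (template : List String) (s : Nat) (h : s + 1 < template.length) :
    template.drop s = template[s] :: template[s + 1] :: template.drop (s + 2) := by
  rw [List.drop_eq_getElem_cons (by omega)]
  congr 1
  rw [List.drop_eq_getElem_cons (by omega)]

lemma slice_pair (template : List String) (start : Int) (h0 : 0 ≤ start)
    (h1 : start < (template.length : Int) - 1) :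
    PySem.List.slice template (some start) (some (start + 2)) =
      [template[start.toNat]'(by omega), template[start.toNat + 1]'(by omega)] := by
  rw [PySem.List.slice_toNat template h0 (by omega)]
  have : (start + 2).toNat - start.toNat = 2 := by omega
  rw [this, drop_two_cons template start.toNat (by omega)]
  rfl

lemma join_pair (a b : String) : PySem.Str.join "" [a, b] = a ++ b := by
  simp [PySem.Str.join, PySem.Chars.join, List.intercalate]

lemma pyGet?_at (template : List String) (i : Int) (h0 : 0 ≤ i) (h1 : i.toNat < template.length) :
    (PySem.List.pyGet? template i).getD "" = template[i.toNat] := by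
  rw [PySem.List.pyGet?_of_nonneg template h0, List.getElem?_eq_getElem h1]
  rfl

lemma step_parts (template : List String) (start : Int) (h0 : 0 ≤ start)
    (hlt : start < (template.length : Int) - 1) :
    PySem.Str.join "" (PySem.List.slice template (some start) (some (start + 2))) =
        (PySem.List.pyGet? template start).getD "" ++ (PySem.List.pyGet? template (start + 1)).getD "" ∧
    (PySem.List.pyGet? (PySem.List.slice template (some start) (some (start + 2))) 0).getD "" =
        (PySem.List.pyGet? template start).getD "" ∧
    (PySem.List.pyGet? (PySem.List.slice template (some start) (some (start + 2))) 1).getD "" =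
        (PySem.List.pyGet? template (start + 1)).getD "" := by
  have h2 : ((start : Int) + 1).toNat = start.toNat + 1 := by omega
  have ha : start.toNat < template.length := by omega
  have hb : (start + 1).toNat < template.length := by omega
  rw [slice_pair template start h0 hlt, join_pair,
    pyGet?_at template start h0 ha, pyGet?_at template (start + 1) (by omega) hb]
  simp only [h2]
  exact ⟨trivial, rfl, rfl⟩

-- A's recursion equals B's fold once the accumulator is nonempty
lemma generate_eq_foldl_of_ne_nil (template : List String) (rules : List (String × String)) :
    ∀ (fuel : Nat) (start : Int) (g : List String), 0 ≤ start →
      (((template.length : Int) - 1 - start).toNat = fuel) → g ≠ [] →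
      generate template g rules start =
        (PySem.List.pyRange start ((template.length : Int) - 1) 1).foldl (genStep template rules) g := by
  intro fuel
  induction fuel with
  | zero =>
    intro start g h0 hf hg
    have hge : start ≥ (template.length : Int) - 1 := by omega
    rw [generate, if_pos hge, PySem.List.pyRange_one_eq_nil hge]
    rfl
  | succ n ih =>
    intro start g h0 hf hg
    have hlt : start < (template.length : Int) - 1 := by omega
    obtain ⟨hkey, -, hsnd⟩ := step_parts template start h0 hlt
    rw [generate, if_neg (by omega)]
    simp only [List.length_eq_zero_iff, if_neg hg]
    rw [PySem.List.pyRange_one_cons hlt, List.foldl_cons, hkey, hsnd]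
    exact ih (start + 1) _ (by omega) (by omega) (by simp)

theorem generate_spec_aux (template generated : List String) (rules : List (String × String)) (start : Int)
    (hpre : Pre_generate template generated rules start) :
    generate template generated rules start = generate_alt template generated rules start := by
  rw [generate_alt_eq_foldl]
  by_cases hge : start ≥ (template.length : Int) - 1
  · rw [generate, if_pos hge, PySem.List.pyRange_one_eq_nil hge,
      if_neg (by rintro ⟨h, _⟩; omega)]
    rfl
  · have hlt : start < (template.length : Int) - 1 := by omega
    have h0 : 0 ≤ start := by
      rcases hpre with h | ⟨h, _⟩
      · omega
      · exact h
    by_cases hg : generated = []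
    · subst hg
      obtain ⟨hkey, hfst, hsnd⟩ := step_parts template start h0 hlt
      rw [if_pos ⟨hlt, rfl⟩, generate, if_neg (by omega)]
      simp only [List.length_nil, List.nil_append, reduceIte]
      rw [PySem.List.pyRange_one_cons hlt, List.foldl_cons, hkey, hfst, hsnd]
      exact generate_eq_foldl_of_ne_nil template rules _ (start + 1) _ (by omega) rfl (by simp)
    · rw [if_neg (by rintro ⟨_, h⟩; exact hg h)]
      exact generate_eq_foldl_of_ne_nil template rules _ start generated h0 rfl hg

-- ===== VERDICT (by name: the statement is the Claim_ definition above) =====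
theorem generate_spec : Claim_equal_generate := by
  intro template generated rules start _ hpre
  unfold Spec_generate
  exact generate_spec_aux template generated rules start hpre
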